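-- pv_equiv track=rewrite | github.com/need-singularity/sylvian-singularity | verify/verify_qcomp_003_hamming_mds_bridge.py | quantum_hamming_bound
-- ===== SOURCE A (Python) =====
-- import math
--
-- def comb(n, k):
--     """Binomial coefficient C(n, k)."""
--     if k < 0 or k > n:
--         return 0
--     return math.comb(n, k)
--
-- def quantum_hamming_bound(n, d):
--     """Compute max k satisfying quantum Hamming bound for [[n,k,d]] code.
--
--     Bound: 2^k * sum_{j=0}^{t} C(n,j) * 3^j <= 2^n
--     where t = floor((d-1)/2).
--     Returns (max_k, lhs_at_k, rhs, is_perfect) for the maximum valid k.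
--     """
--     t = (d - 1) // 2
--     hamming_sum = sum(comb(n, j) * (3 ** j) for j in range(t + 1))
--     rhs = 2 ** n
--
--     # Find max k such that 2^k * hamming_sum <= 2^n
--     if hamming_sum == 0:
--         return (n, 0, rhs, False)
--
--     max_k = 0
--     for k in range(n + 1):
--         if (2 ** k) * hamming_sum <= rhs:
--             max_k = k
--         else:
--             break
--
--     lhs = (2 ** max_k) * hamming_sum
--     is_perf = (lhs == rhs)
--     return (max_k, lhs, rhs, is_perf)
-- ===== SOURCE B (Python) =====
-- def quantum_hamming_bound(n, d):
--     """Compute max k satisfying quantum Hamming bound for [[n,k,d]] code.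
--
--     Same result as the scanning version, but the Hamming sum is built with the
--     multiplicative recurrence C(n,j)*3^j = C(n,j-1)*3^(j-1)*3*(n-j+1)/j and
--     max_k is read off directly from bit_length of rhs // sum instead of
--     scanning k from 0 to n.
--     """
--     t = (d - 1) // 2
--     rhs = 2 ** n
--     if t < 0:
--         return (n, 0, rhs, False)
--     s = 1
--     term = 1
--     for j in range(1, min(t, n) + 1):
--         term = term * 3 * (n - j + 1) // j
--         s += term
--     q = rhs // s
--     max_k = min(n, q.bit_length() - 1)
--     if max_k < 0:
--         max_k = 0
--     lhs = (2 ** max_k) * s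
--     return (max_k, lhs, rhs, lhs == rhs)
-- ===== Notes on version B (the rewrite author's own statement) =====
-- stated objective: faster
-- what changed: max_k is computed directly as min(n, (2^n // hamming_sum).bit_length() - 1) instead of scanning k = 0..n with big-integer powers, and the Hamming sum uses the multiplicative term recurrence instead of calling comb(n, j) afresh for each j.
-- outside the precondition, e.g. on quantum_hamming_bound(-1, 3): A returns (-1, 0, 0.5, False), B raises AttributeError
import Mathlib
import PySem

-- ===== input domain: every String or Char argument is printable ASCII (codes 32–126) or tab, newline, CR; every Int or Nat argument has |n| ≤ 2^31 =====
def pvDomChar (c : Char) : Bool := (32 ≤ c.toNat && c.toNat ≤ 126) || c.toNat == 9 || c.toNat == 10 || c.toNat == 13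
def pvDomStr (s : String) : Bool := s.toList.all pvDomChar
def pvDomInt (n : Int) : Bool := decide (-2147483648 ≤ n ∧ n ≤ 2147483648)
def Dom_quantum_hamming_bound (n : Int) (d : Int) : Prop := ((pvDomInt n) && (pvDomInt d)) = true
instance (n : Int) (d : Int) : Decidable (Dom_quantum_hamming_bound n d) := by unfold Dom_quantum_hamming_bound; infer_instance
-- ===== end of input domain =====

-- B replaces the k = 0..n scan by bit_length of rhs // hamming_sum and computes the
-- Hamming sum by the multiplicative term recurrence; objective: faster.

-- ===== PORT A =====
-- comb(n, k) helper of A; math.comb is only reached with 0 ≤ k ≤ n, where it is Nat.choose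
def pvComb (n k : Int) : Int :=
  if k < 0 ∨ k > n then 0 else (Nat.choose n.toNat k.toNat : Int)

-- the 'for k in range(n+1): … else: break' loop of A, carrying max_k
def pvLoopA (s rhs : Int) : List Int → Int → Int
  | [], mk => mk
  | k :: rest, mk =>
    if (2:Int) ^ k.toNat * s ≤ rhs then pvLoopA s rhs rest k else mk

-- 2 ** n, 3 ** j, 2 ** k are ported as Int powers of the exponent's toNat;
-- exact whenever the exponent is nonnegative (Pre_ gives 0 ≤ n; j, k come from ranges)
def quantum_hamming_bound (n : Int) (d : Int) : Int × Int × Int × Bool :=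
  let t := PySem.Int.floordiv (d - 1) 2
  let hamming_sum :=
    ((PySem.List.pyRange 0 (t + 1) 1).map (fun j => pvComb n j * (3:Int) ^ j.toNat)).sum
  let rhs := (2:Int) ^ n.toNat
  if hamming_sum = 0 then (n, 0, rhs, false)
  else
    let max_k := pvLoopA hamming_sum rhs (PySem.List.pyRange 0 (n + 1) 1) 0
    let lhs := (2:Int) ^ max_k.toNat * hamming_sum
    (max_k, lhs, rhs, decide (lhs = rhs))

-- ===== PORT B =====
-- the 'for j in range(1, min(t, n) + 1)' loop of B, carrying (term, s)
def pvLoopB (n : Int) : List Int → Int → Int → Int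
  | [], _, s => s
  | j :: rest, term, s =>
    let term' := PySem.Int.floordiv (term * 3 * (n - j + 1)) j
    pvLoopB n rest term' (s + term')

def quantum_hamming_bound_alt (n : Int) (d : Int) : Int × Int × Int × Bool :=
  let t := PySem.Int.floordiv (d - 1) 2
  let rhs := (2:Int) ^ n.toNat
  if t < 0 then (n, 0, rhs, false)
  else
    let s := pvLoopB n (PySem.List.pyRange 1 (min t n + 1) 1) 1 1
    let q := PySem.Int.floordiv rhs s
    let mk0 := min n ((PySem.Int.bitLength q : Int) - 1)
    let max_k := if mk0 < 0 then 0 else mk0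
    let lhs := (2:Int) ^ max_k.toNat * s
    (max_k, lhs, rhs, decide (lhs = rhs))

-- ===== PRECONDITION & SPEC =====
-- Pre_ excludes n < 0, where Python's 2**n is a float: A then returns a tuple containing
-- a float, which is not a value of the declared Int type.
def Pre_quantum_hamming_bound (n : Int) (d : Int) : Prop := 0 ≤ n
instance (n : Int) (d : Int) : Decidable (Pre_quantum_hamming_bound n d) := by
  unfold Pre_quantum_hamming_bound; infer_instance

def pvWitness_quantum_hamming_bound : Int × Int := (5, 3)

def Spec_quantum_hamming_bound (n : Int) (d : Int) (out : Int × Int × Int × Bool) : Prop := out = quantum_hamming_bound_alt n d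
instance (n : Int) (d : Int) (out : Int × Int × Int × Bool) : Decidable (Spec_quantum_hamming_bound n d out) := by unfold Spec_quantum_hamming_bound; infer_instance

-- ===== CLAIM (what is proved, stated in full; the proofs are below) =====
def Claim_equal_quantum_hamming_bound : Prop := ∀ (n : Int) (d : Int), Dom_quantum_hamming_bound n d → Pre_quantum_hamming_bound n d → Spec_quantum_hamming_bound n d (quantum_hamming_bound n d)



-- ===== LEMMAS AND PROOFS =====

lemma pvComb_natCast (N k : Nat) (h : k ≤ N) :
    pvComb (N : Int) (k : Int) = (Nat.choose N k : Int) := by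
  unfold pvComb
  rw [if_neg (by push_cast; omega)]
  simp

-- term recurrence step: dividing C(n,a-1)*3^(a-1)*3*(n-a+1) by a lands exactly on C(n,a)*3^a
lemma pvTermStep (n a : Int) (h1 : 1 ≤ a) (h2 : a ≤ n) :
    PySem.Int.floordiv (pvComb n (a - 1) * (3:Int) ^ (a - 1).toNat * 3 * (n - a + 1)) a
      = pvComb n a * (3:Int) ^ a.toNat := by
  obtain ⟨A, rfl⟩ : ∃ A : Nat, a = (A : Int) := ⟨a.toNat, by omega⟩
  obtain ⟨N, rfl⟩ : ∃ N : Nat, n = (N : Int) := ⟨n.toNat, by omega⟩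
  have hA : 1 ≤ A := by exact_mod_cast h1
  have hAN : A ≤ N := by exact_mod_cast h2
  have e1 : (A : Int) - 1 = ((A - 1 : Nat) : Int) := by omega
  rw [e1, pvComb_natCast N (A - 1) (by omega), pvComb_natCast N A hAN]
  have e2 : ((A : Int)).toNat = A := Int.toNat_natCast A
  have e3 : (((A - 1 : Nat) : Int)).toNat = A - 1 := Int.toNat_natCast _
  rw [e2, e3]
  have e4 : (N : Int) - (A : Int) + 1 = ((N - (A - 1) : Nat) : Int) := by omega
  rw [e4]
  have key : N.choose (A - 1) * 3 ^ (A - 1) * 3 * (N - (A - 1)) = A * (N.choose A * 3 ^ A) := by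
    have h5 := Nat.choose_succ_right_eq N (A - 1)
    have h6 : A - 1 + 1 = A := by omega
    rw [h6] at h5
    have h7 : (3:Nat) ^ A = 3 ^ (A - 1) * 3 := by rw [← pow_succ, h6]
    calc N.choose (A - 1) * 3 ^ (A - 1) * 3 * (N - (A - 1))
        = (N.choose (A - 1) * (N - (A - 1))) * (3 ^ (A - 1) * 3) := by ring
      _ = (N.choose A * A) * 3 ^ A := by rw [← h5, h7]
      _ = A * (N.choose A * 3 ^ A) := by ring
  have e5 : (N.choose (A - 1) : Int) * (3:Int) ^ (A - 1) * 3 * ((N - (A - 1) : Nat) : Int)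
      = ((N.choose (A - 1) * 3 ^ (A - 1) * 3 * (N - (A - 1)) : Nat) : Int) := by
    push_cast; ring
  rw [e5, PySem.Int.floordiv_natCast, key, Nat.mul_div_cancel_left _ (by omega : 0 < A)]
  push_cast; ring

-- B's loop computes the tail of A's sum, given the invariant on term
lemma pvLoopB_sum (n : Int) :
    ∀ (len : Nat) (a s : Int), 1 ≤ a → a + len ≤ n + 1 →
    pvLoopB n (PySem.List.pyRange a (a + len) 1) (pvComb n (a - 1) * (3:Int) ^ (a - 1).toNat) s
      = s + ((PySem.List.pyRange a (a + len) 1).map (fun j => pvComb n j * (3:Int) ^ j.toNat)).sum := by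
  intro len
  induction len with
  | zero =>
    intro a s h1 h2
    rw [show a + ((0 : Nat) : Int) = a by push_cast; ring,
        PySem.List.pyRange_one_eq_nil le_rfl]
    simp [pvLoopB]
  | succ len ih =>
    intro a s h1 h2
    have hlt : a < a + ((len + 1 : Nat) : Int) := by push_cast; omega
    rw [PySem.List.pyRange_one_cons hlt]
    rw [pvLoopB]
    rw [pvTermStep n a h1 (by push_cast at h2; omega)]
    have hre : a + ((len + 1 : Nat) : Int) = (a + 1) + ((len : Nat) : Int) := by push_cast; ring
    rw [hre]
    have ih' := ih (a + 1) (s + pvComb n a * (3:Int) ^ a.toNat) (by omega)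
      (by push_cast at h2 ⊢ ; omega)
    rw [show a + 1 - 1 = a by ring] at ih'
    rw [ih']
    rw [List.map_cons, List.sum_cons]
    ring

-- the two hamming sums agree (A sums to t, B to min t n; the extra terms are 0)
lemma pvSum_eq (n d : Int) (hn : 0 ≤ n)
    (ht : 0 ≤ PySem.Int.floordiv (d - 1) 2) :
    pvLoopB n (PySem.List.pyRange 1 (min (PySem.Int.floordiv (d - 1) 2) n + 1) 1) 1 1
      = ((PySem.List.pyRange 0 (PySem.Int.floordiv (d - 1) 2 + 1) 1).map
          (fun j => pvComb n j * (3:Int) ^ j.toNat)).sum := by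
  set t := PySem.Int.floordiv (d - 1) 2 with hts
  set m := min t n with hms
  have hm0 : 0 ≤ m := by omega
  have hcomb0 : pvComb n 0 * (3:Int) ^ ((0:Int)).toNat = 1 := by
    unfold pvComb
    rw [if_neg (by omega)]
    simp
  have hlen : (1 : Int) + ((m.toNat : Nat) : Int) = m + 1 := by omega
  have hLS := pvLoopB_sum n m.toNat 1 1 le_rfl (by push_cast; omega)
  rw [hlen, show (1:Int) - 1 = 0 by ring, hcomb0] at hLS
  rw [hLS]
  rw [PySem.List.pyRange_one_append 0 (m + 1) (t + 1) (by omega) (by omega)]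
  rw [List.map_append, List.sum_append]
  have htail : ((PySem.List.pyRange (m + 1) (t + 1) 1).map
      (fun j => pvComb n j * (3:Int) ^ j.toNat)).sum = 0 := by
    apply List.sum_eq_zero
    intro x hx
    obtain ⟨j, hj, rfl⟩ := List.mem_map.mp hx
    rw [PySem.List.mem_pyRange_one] at hj
    have hjn : j > n := by omega
    have hz : pvComb n j = 0 := by unfold pvComb; rw [if_pos (Or.inr hjn)]
    rw [hz, zero_mul]
  rw [htail, add_zero]
  rw [PySem.List.pyRange_one_cons (by omega : (0:Int) < m + 1)]
  rw [List.map_cons, List.sum_cons, hcomb0]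
  rw [show (0:Int) + 1 = 1 by ring]

lemma pvSum_pos (n d : Int) (hn : 0 ≤ n) (ht : 0 ≤ PySem.Int.floordiv (d - 1) 2) :
    1 ≤ ((PySem.List.pyRange 0 (PySem.Int.floordiv (d - 1) 2 + 1) 1).map
          (fun j => pvComb n j * (3:Int) ^ j.toNat)).sum := by
  set t := PySem.Int.floordiv (d - 1) 2 with hts
  rw [PySem.List.pyRange_one_cons (by omega : (0:Int) < t + 1)]
  rw [List.map_cons, List.sum_cons]
  have hcomb0 : pvComb n 0 * (3:Int) ^ ((0:Int)).toNat = 1 := by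
    unfold pvComb; rw [if_neg (by omega)]; simp
  rw [hcomb0]
  have htail : 0 ≤ ((PySem.List.pyRange (0 + 1) (t + 1) 1).map
      (fun j => pvComb n j * (3:Int) ^ j.toNat)).sum := by
    apply List.sum_nonneg
    intro x hx
    obtain ⟨j, hj, rfl⟩ := List.mem_map.mp hx
    apply mul_nonneg
    . unfold pvComb
      split
      . exact le_rfl
      . positivity
    . positivity
  linarith

-- A's break loop over range with a monotone threshold m
lemma pvLoopA_range (s rhs : Int) (m : Nat)
    (hP : ∀ a : Int, 0 ≤ a → ((2:Int) ^ a.toNat * s ≤ rhs ↔ a ≤ (m:Int))) :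
    ∀ (len : Nat) (a acc : Int), 0 ≤ a →
    pvLoopA s rhs (PySem.List.pyRange a (a + len) 1) acc
      = if len = 0 ∨ (m:Int) < a then acc else min (m:Int) (a + len - 1) := by
  intro len
  induction len with
  | zero =>
    intro a acc ha
    rw [show a + ((0 : Nat) : Int) = a by push_cast; ring,
        PySem.List.pyRange_one_eq_nil le_rfl]
    simp [pvLoopA]
  | succ len ih =>
    intro a acc ha
    have hlt : a < a + ((len + 1 : Nat) : Int) := by push_cast; omega
    rw [PySem.List.pyRange_one_cons hlt]
    rw [pvLoopA]
    by_cases hc : a ≤ (m : Int)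
    . rw [if_pos ((hP a ha).mpr hc)]
      have hre : a + ((len + 1 : Nat) : Int) = (a + 1) + ((len : Nat) : Int) := by push_cast; ring
      rw [hre, ih (a + 1) a (by omega)]
      rw [if_neg (show ¬ ((len + 1 : Nat) = 0 ∨ (m:Int) < a) by rintro (h | h) <;> omega)]
      by_cases h2 : len = 0
      . subst h2
        rw [if_pos (Or.inl rfl)]
        rw [show a + 1 + (((0:Nat)) : Int) - 1 = a by push_cast; ring]
        rw [min_eq_right hc]
      . by_cases h3 : (m : Int) < a + 1
        . rw [if_pos (Or.inr h3)]
          rw [min_eq_left (by push_cast; omega : (m:Int) ≤ a + 1 + ((len:Nat) : Int) - 1)]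
          omega
        . rw [if_neg (by rintro (h | h); exacts [h2 h, h3 h])]
    . rw [if_neg (by rw [hP a ha]; exact hc)]
      rw [if_pos (Or.inr (by omega))]

-- B's direct max_k formula equals A's scan, for 1 ≤ S
lemma pvMaxk_eq (n S : Int) (hn : 0 ≤ n) (hS : 1 ≤ S) :
    (if min n ((PySem.Int.bitLength (PySem.Int.floordiv ((2:Int) ^ n.toNat) S) : Int) - 1) < 0 then 0
     else min n ((PySem.Int.bitLength (PySem.Int.floordiv ((2:Int) ^ n.toNat) S) : Int) - 1))
      = pvLoopA S ((2:Int) ^ n.toNat) (PySem.List.pyRange 0 (n + 1) 1) 0 := by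
  obtain ⟨N, rfl⟩ : ∃ N : Nat, n = (N : Int) := ⟨n.toNat, by omega⟩
  obtain ⟨SN, hSN⟩ : ∃ SN : Nat, S = (SN : Int) := ⟨S.toNat, by omega⟩
  subst hSN
  have hSN1 : 1 ≤ SN := by exact_mod_cast hS
  rw [Int.toNat_natCast N]
  have hq : PySem.Int.floordiv ((2:Int) ^ N) ((SN : Nat) : Int)
      = ((2 ^ N / SN : Nat) : Int) := by
    rw [show ((2:Int) ^ N) = ((2 ^ N : Nat) : Int) by push_cast; ring]
    exact PySem.Int.floordiv_natCast _ _
  rw [hq]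
  by_cases hQ : 2 ^ N / SN = 0
  . -- S exceeds rhs: the loop fails already at k = 0, and bit_length 0 - 1 is clamped to 0
    have hlt : 2 ^ N < SN := by
      rcases (Nat.div_eq_zero_iff).mp hQ with h | h
      . omega
      . exact h
    rw [hQ]
    rw [show (((0 : Nat)) : Int) = (0 : Int) by norm_num, PySem.Int.bitLength_zero]
    rw [if_pos (by push_cast; omega)]
    rw [PySem.List.pyRange_one_cons (by push_cast; omega : (0:Int) < (N : Int) + 1)]
    rw [pvLoopA]
    rw [if_neg (by
      rw [show ((0:Int)).toNat = 0 by norm_num]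
      have hc : ((2 ^ N : Nat) : Int) < ((SN : Nat) : Int) := by exact_mod_cast hlt
      push_cast at hc ⊢
      omega)]
  . set Q := 2 ^ N / SN with hQs
    have hQ1 : 1 ≤ Q := Nat.pos_of_ne_zero hQ
    set m := Nat.log 2 Q with hms
    have hQle : Q ≤ 2 ^ N := Nat.div_le_self _ _
    have hmN : m ≤ N := by
      calc m ≤ Nat.log 2 (2 ^ N) := Nat.log_mono_right hQle
        _ = N := Nat.log_pow one_lt_two N
    have hP : ∀ a : Int, 0 ≤ a →
        ((2:Int) ^ a.toNat * ((SN : Nat) : Int) ≤ (2:Int) ^ N ↔ a ≤ (m : Int)) := by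
      intro a ha
      have hcast : ((2:Int) ^ a.toNat * ((SN : Nat) : Int) ≤ (2:Int) ^ N)
          ↔ (2 ^ a.toNat * SN ≤ 2 ^ N) := by
        constructor
        . intro h; exact_mod_cast h
        . intro h; exact_mod_cast h
      rw [hcast, ← Nat.le_div_iff_mul_le (by omega : 0 < SN), ← hQs]
      rw [Nat.pow_le_iff_le_log one_lt_two (by omega)]
      omega
    have hloop := pvLoopA_range ((SN : Nat) : Int) ((2:Int) ^ N) m hP (N + 1) 0 0 le_rfl
    rw [show (0:Int) + ((N + 1 : Nat) : Int) = (N : Int) + 1 by push_cast; ring] at hloop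
    rw [hloop, if_neg (show ¬ ((N + 1 : Nat) = 0 ∨ (m:Int) < 0) by rintro (h | h) <;> omega)]
    have hBne : ((Q : Nat) : Int) ≠ 0 := by exact_mod_cast (by omega : Q ≠ 0)
    have hub := PySem.Int.lt_two_pow_bitLength ((Q : Nat) : Int)
    have hlb := PySem.Int.two_pow_bitLength_le ((Q : Nat) : Int) hBne
    rw [Int.natAbs_natCast] at hub hlb
    set B := PySem.Int.bitLength ((Q : Nat) : Int) with hBs
    have hB1 : 1 ≤ B := by
      rcases Nat.eq_zero_or_pos B with h | h
      . rw [h] at hub; simp at hub; omega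
      . exact h
    have hmB : m = B - 1 := by
      rw [hms]
      apply Nat.log_eq_of_pow_le_of_lt_pow hlb
      rw [show B - 1 + 1 = B by omega]
      exact hub
    rw [show (N:Int) + 1 - 1 = (N : Int) by ring]
    rw [show ((B:Int) - 1) = ((B - 1 : Nat) : Int) by omega]
    have hle : ((B - 1 : Nat) : Int) ≤ (N : Int) := by exact_mod_cast (hmB ▸ hmN)
    rw [min_eq_right hle]
    rw [if_neg (by omega : ¬ (((B - 1 : Nat) : Int) < 0))]
    rw [min_eq_left (show ((m:Nat) : Int) ≤ (N : Int) by exact_mod_cast hmN)]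
    exact_mod_cast hmB.symm

-- ===== VERDICT (by name: the statement is the Claim_ definition above) =====
theorem quantum_hamming_bound_spec : Claim_equal_quantum_hamming_bound := by
  intro n d _ hn
  unfold Spec_quantum_hamming_bound
  simp only [quantum_hamming_bound, quantum_hamming_bound_alt]
  by_cases ht : PySem.Int.floordiv (d - 1) 2 < 0
  . rw [show PySem.List.pyRange 0 (PySem.Int.floordiv (d - 1) 2 + 1) 1 = []
        from PySem.List.pyRange_one_eq_nil (by omega)]
    rw [if_pos ht]
    norm_num
  . push_neg at ht
    have hS := pvSum_pos n d hn ht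
    have hSB := pvSum_eq n d hn ht
    rw [if_neg (by omega : ¬ (PySem.Int.floordiv (d - 1) 2 < 0))]
    rw [if_neg (by omega :
      ¬ (((PySem.List.pyRange 0 (PySem.Int.floordiv (d - 1) 2 + 1) 1).map
        (fun j => pvComb n j * (3:Int) ^ j.toNat)).sum = 0))]
    rw [hSB]
    rw [pvMaxk_eq n _ hn hS]
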